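-- pv_equiv track=rewrite | github.com/shuklaham/priors-visualization | sunburst/helper.py | parseImpressions
-- ===== SOURCE A (Python) =====
-- def parseImpressions(s):
--     p = -1
--     res= []
--     for i in range(len(s)):
--         if i == len(s) - 1:
--             t = s[p + 1:i+1].strip()
--             if len(t) > 3:
--                 res.append(t)
--         elif s[i] == '.':
--             t = s[p+1:i].strip()
--             if len(t) > 3:
--                 res.append(t)
--             p = i
--     return res
-- ===== SOURCE B (Python) =====
-- def parseImpressions(s):
--     if not s:
--         return []
--     parts = s[:-1].split('.')
--     parts[-1] += s[-1]
--     return [t for t in (seg.strip() for seg in parts) if len(t) > 3]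
-- ===== Notes on version B (the rewrite author's own statement) =====
-- stated objective: idiomatic
-- what changed: Replaces A's single index-by-index scan with its hand-maintained last-dot pointer and per-character slicing by one str.split pass over s[:-1] (reattaching the final character so a trailing dot never splits, as in A) followed by a strip-and-filter comprehension.
import Mathlib
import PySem

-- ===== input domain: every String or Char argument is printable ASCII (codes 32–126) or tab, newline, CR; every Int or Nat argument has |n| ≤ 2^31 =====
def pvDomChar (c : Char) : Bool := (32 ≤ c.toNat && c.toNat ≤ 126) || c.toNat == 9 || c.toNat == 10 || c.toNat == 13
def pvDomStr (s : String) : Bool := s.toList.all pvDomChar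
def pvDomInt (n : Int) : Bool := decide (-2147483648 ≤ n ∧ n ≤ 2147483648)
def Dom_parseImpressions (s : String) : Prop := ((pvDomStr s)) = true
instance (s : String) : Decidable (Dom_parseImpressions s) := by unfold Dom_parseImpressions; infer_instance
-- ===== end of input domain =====

-- B replaces A's index scan (last-dot pointer + per-character slicing) with one split pass
-- over s[:-1] plus a strip-and-filter comprehension; same results, different decomposition.

-- ===== PORT A =====
-- loop body of A, as a helper
def pvStepA (s : String) (n : Int) (st : Int × List String) (i : Int) : Int × List String :=
  if i == n - 1 then
    let t := PySem.Str.strip (PySem.Str.slice s (some (st.1 + 1)) (some (i + 1)))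
    if PySem.Str.len t > 3 then (st.1, st.2 ++ [t]) else st
  else if PySem.Str.pyGet? s i == some '.' then
    let t := PySem.Str.strip (PySem.Str.slice s (some (st.1 + 1)) (some i))
    (i, if PySem.Str.len t > 3 then st.2 ++ [t] else st.2)
  else st

def parseImpressions (s : String) : List String :=
  let n : Int := PySem.Str.len s
  ((PySem.List.pyRange 0 n 1).foldl (pvStepA s n) (-1, [])).2

-- ===== PORT B =====
-- `parts[-1] += c` on a non-empty list, as a pure function
def pvAttachLast (parts : List String) (c : String) : List String :=
  match parts with
  | [] => []
  | [x] => [x ++ c]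
  | x :: xs => x :: pvAttachLast xs c

def parseImpressions_alt (s : String) : List String :=
  if s == "" then []
  else
    let parts := (PySem.Str.split? (PySem.Str.slice s none (some (-1))) ".").getD []
    let parts := pvAttachLast parts (PySem.Str.slice s (some (-1)) none)
    (parts.map PySem.Str.strip).filter (fun t => PySem.Str.len t > 3)

-- ===== PRECONDITION & SPEC =====
def Spec_parseImpressions (s : String) (out : List String) : Prop := out = parseImpressions_alt s
instance (s : String) (out : List String) : Decidable (Spec_parseImpressions s out) := by unfold Spec_parseImpressions; infer_instance

-- ===== CLAIM (what is proved, stated in full; the proofs are below) =====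
def Claim_equal_parseImpressions : Prop := ∀ (s : String), Dom_parseImpressions s → Spec_parseImpressions s (parseImpressions s)

-- ===== LEMMAS AND PROOFS =====
def pvSplit : List Char → List (List Char)
  | [] => [[]]
  | c :: rest =>
    if c = '.' then [] :: pvSplit rest
    else match pvSplit rest with
      | [] => [[c]]
      | p :: ps => (c :: p) :: ps
def pvConsHead (cur : List Char) : List (List Char) → List (List Char)
  | [] => []
  | p :: ps => (cur ++ p) :: ps
theorem pvSplit_ne_nil (cs : List Char) : pvSplit cs ≠ [] := by
  cases cs with
  | nil => simp [pvSplit]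
  | cons c rest =>
    simp only [pvSplit]
    split <;> [simp; skip]
    split <;> simp

theorem pvSplitOn_go (fuel : Nat) : ∀ (l cur : List Char) (acc : List (List Char)),
    l.length < fuel →
    PySem.Chars.splitOn.go ['.'] fuel l cur acc
      = acc.reverse ++ pvConsHead cur.reverse (pvSplit l) := by
  induction fuel with
  | zero => intro l cur acc h; omega
  | succ f ih =>
    intro l cur acc h
    cases l with
    | nil =>
      rw [PySem.Chars.splitOn.go]
      · simp [pvSplit, pvConsHead]
      · omega
    | cons c rest =>
      rw [PySem.Chars.splitOn.go]
      by_cases hc : c = '.'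
      · subst hc
        simp only [List.isPrefixOf, List.length_cons] at h ⊢
        simp only [BEq.rfl, Bool.true_and, if_true, List.drop_succ_cons, List.length_nil, List.drop_zero]
        rw [ih rest [] (cur.reverse :: acc) (by omega)]
        obtain ⟨p, ps, hps⟩ : ∃ p ps, pvSplit rest = p :: ps := by
          cases hx : pvSplit rest with
          | nil => exact absurd hx (pvSplit_ne_nil rest)
          | cons p ps => exact ⟨p, ps, rfl⟩
        simp [pvSplit, hps, pvConsHead]
      · have : (['.'].isPrefixOf (c :: rest)) = false := by
          simp [List.isPrefixOf]
          intro h'; exact absurd h'.symm hc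
        simp only [this, if_false, Bool.false_eq_true]
        rw [ih rest (c :: cur) acc (by simp at h ⊢; omega)]
        obtain ⟨p, ps, hps⟩ : ∃ p ps, pvSplit rest = p :: ps := by
          cases hx : pvSplit rest with
          | nil => exact absurd hx (pvSplit_ne_nil rest)
          | cons p ps => exact ⟨p, ps, rfl⟩
        simp [pvSplit, hps, hc, pvConsHead]

theorem pvSplitOn_eq (cs : List Char) : PySem.Chars.splitOn cs ['.'] = pvSplit cs := by
  rw [PySem.Chars.splitOn, pvSplitOn_go (cs.length + 1) cs [] [] (by omega)]
  obtain ⟨p, ps, hps⟩ : ∃ p ps, pvSplit cs = p :: ps := by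
    cases hx : pvSplit cs with
    | nil => exact absurd hx (pvSplit_ne_nil cs)
    | cons p ps => exact ⟨p, ps, rfl⟩
  simp [hps, pvConsHead]
def pvSegs (cur : List Char) : List Char → List (List Char)
  | [] => []
  | [c] => [cur ++ [c]]
  | c :: rest => if c = '.' then cur :: pvSegs [] rest else pvSegs (cur ++ [c]) rest

def pvAttachLastC (parts : List (List Char)) (c : Char) : List (List Char) :=
  match parts with
  | [] => []
  | [x] => [x ++ [c]]
  | x :: xs => x :: pvAttachLastC xs c

theorem pvSegs_eq_attach : ∀ (cs : List Char) (c : Char) (cur : List Char),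
    pvSegs cur (cs ++ [c]) = pvConsHead cur (pvAttachLastC (pvSplit cs) c) := by
  intro cs
  induction cs with
  | nil => intro c cur; simp [pvSegs, pvSplit, pvAttachLastC, pvConsHead]
  | cons d cs' ih =>
    intro c cur
    cases cs' with
    | nil =>
      by_cases hd : d = '.' <;>
        simp [pvSegs, pvSplit, pvAttachLastC, pvConsHead, hd]
    | cons e l' =>
      obtain ⟨p, ps, hps⟩ : ∃ p ps, pvSplit (e :: l') = p :: ps := by
        cases hx : pvSplit (e :: l') with
        | nil => exact absurd hx (pvSplit_ne_nil _)
        | cons p ps => exact ⟨p, ps, rfl⟩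
      by_cases hd : d = '.'
      · have h1 := ih c []
        have h2 : pvSegs cur (d :: (e :: l') ++ [c]) = cur :: pvSegs [] ((e :: l') ++ [c]) := by
          simp [pvSegs, hd]
        have h3 : pvSplit (d :: e :: l') = [] :: pvSplit (e :: l') := by
          simp [pvSplit, hd]
        rw [h2, h1, h3, hps]
        cases ps with
        | nil => simp [pvAttachLastC, pvConsHead]
        | cons q qs => simp [pvAttachLastC, pvConsHead]
      · have h1 := ih c (cur ++ [d])
        have h2 : pvSegs cur (d :: (e :: l') ++ [c]) = pvSegs (cur ++ [d]) ((e :: l') ++ [c]) := by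
          simp [pvSegs, hd]
        have h3 : pvSplit (d :: e :: l') = (d :: p) :: ps := by
          rw [pvSplit.eq_def]
          simp [hd, hps]
        rw [h2, h1, h3, hps]
        cases ps with
        | nil => simp [pvAttachLastC, pvConsHead]
        | cons q qs => simp [pvAttachLastC, pvConsHead]
def pvOut (ls : List (List Char)) : List String :=
  ((ls.map PySem.Chars.strip).filter (fun t => t.length > 3)).map String.ofList



theorem pvConsHead_nil (X : List (List Char)) : pvConsHead [] X = X := by
  cases X <;> simp [pvConsHead]

theorem pvAttachLast_map (ps : List (List Char)) (c : Char) :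
    pvAttachLast (ps.map String.ofList) (String.ofList [c])
      = (pvAttachLastC ps c).map String.ofList := by
  induction ps with
  | nil => simp [pvAttachLast, pvAttachLastC]
  | cons x xs ih =>
    cases xs with
    | nil => simp [pvAttachLast, pvAttachLastC]
    | cons y ys =>
      simp only [List.map_cons, pvAttachLast, pvAttachLastC] at ih ⊢
      rw [ih]

theorem pvStrip_ofList (l : List Char) :
    PySem.Str.strip (String.ofList l) = String.ofList (PySem.Chars.strip l) := by
  rw [PySem.Str.strip]; simp

theorem pvOut_map (ls : List (List Char)) :
    (((ls.map String.ofList).map PySem.Str.strip).filter (fun t => PySem.Str.len t > 3))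
      = pvOut ls := by
  induction ls with
  | nil => simp [pvOut]
  | cons x xs ih =>
    simp only [List.map_cons, List.filter_cons, pvOut] at ih ⊢
    rw [pvStrip_ofList]
    by_cases h : (PySem.Chars.strip x).length > 3
    · simp [h]
      simpa using ih
    · simp [h]
      simpa using ih

theorem pvB_eq (s : String) : parseImpressions_alt s = pvOut (pvSegs [] s.toList) := by
  by_cases hs : s = ""
  · subst hs; simp [parseImpressions_alt, pvSegs, pvOut]
  · have hne : s.toList ≠ [] := by simp [hs]
    obtain ⟨init, c, hic⟩ : ∃ init c, s.toList = init ++ [c] :=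
      ⟨s.toList.dropLast, s.toList.getLast hne, by simp [List.dropLast_append_getLast hne]⟩
    have hsplit : (PySem.Str.split? (PySem.Str.slice s none (some (-1))) ".").getD []
        = (pvSplit init).map String.ofList := by
      rw [PySem.Str.split?, PySem.Chars.split?]
      have : (PySem.Str.slice s none (some (-1))).toList = init := by
        rw [PySem.Str.toList_slice]
        simp [hic, PySem.List.slice_to_neg_one]
      rw [this]
      have he : (".".toList) = ['.'] := rfl
      simp only [he]
      rw [pvSplitOn_eq]
      rfl
    have hlast : PySem.Str.slice s (some (-1)) none = String.ofList [c] := by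
      apply String.toList_inj.mp
      rw [PySem.Str.toList_slice]
      simp only [PySem.Chars.slice_eq_listSlice, hic]
      rw [PySem.List.slice_from_neg_one]
      simp
    rw [parseImpressions_alt]
    rw [if_neg (by simp [hs])]
    simp only [hsplit, hlast, pvAttachLast_map]
    rw [pvOut_map, hic, pvSegs_eq_attach, pvConsHead_nil]


theorem pvSegs_cons (cur : List Char) (c : Char) (rest : List Char) (h : rest ≠ []) :
    pvSegs cur (c :: rest) = if c = '.' then cur :: pvSegs [] rest else pvSegs (cur ++ [c]) rest := by
  cases rest with
  | nil => exact absurd rfl h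
  | cons e l' => rfl

theorem pvOut_cons (x : List Char) (l : List (List Char)) :
    pvOut (x :: l) = (if (PySem.Chars.strip x).length > 3
      then [String.ofList (PySem.Chars.strip x)] else []) ++ pvOut l := by
  by_cases h : (PySem.Chars.strip x).length > 3 <;> simp [pvOut, h]

theorem pvTake_succ (cs : List Char) (m k : Nat) (hm : m ≤ k) (hk : k < cs.length) :
    (cs.drop m).take (k - m) ++ [cs[k]] = (cs.drop m).take (k + 1 - m) := by
  have h1 : k + 1 - m = (k - m) + 1 := by omega
  rw [h1, List.take_add_one]
  have h2 : (cs.drop m)[k - m]? = some cs[k] := by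
    rw [List.getElem?_drop]
    have : m + (k - m) = k := by omega
    rw [this, List.getElem?_eq_getElem hk]
  rw [h2]
  rfl

theorem pvStrip_slice (s : String) (m j : Nat) :
    PySem.Str.strip (PySem.Str.slice s (some ((m : Int))) (some ((j : Int))))
      = String.ofList (PySem.Chars.strip ((s.toList.drop m).take (j - m))) := by
  rw [PySem.Str.strip]
  congr 1
  rw [PySem.Str.toList_slice]
  simp [PySem.List.slice_natCast]

theorem pvLen_ofList (l : List Char) : PySem.Str.len (String.ofList l) = (l.length : Int) := by
  simp [PySem.Str.len]

theorem pvA_loop (s : String) (d : Nat) : ∀ (k m : Nat) (res : List String),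
    m ≤ k → k ≤ s.toList.length → s.toList.length - k = d →
    ((PySem.List.pyRange (k : Int) (s.toList.length : Int) 1).foldl
        (pvStepA s (s.toList.length : Int)) ((m : Int) - 1, res)).2
      = res ++ pvOut (pvSegs ((s.toList.drop m).take (k - m)) (s.toList.drop k)) := by
  induction d with
  | zero =>
    intro k m res hmk hk hd
    have hk' : k = s.toList.length := by omega
    rw [hk']
    have h1 : PySem.List.pyRange ((s.toList.length : Nat) : Int) (s.toList.length : Int) 1 = [] := by
      simp [PySem.List.pyRange]
    rw [h1, List.foldl_nil, List.drop_length]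
    simp [pvSegs, pvOut]
  | succ d ih =>
    intro k m res hmk hk hd
    have hkn : k < s.toList.length := by omega
    rw [PySem.List.pyRange_one_cons (by exact_mod_cast hkn)]
    rw [List.foldl_cons]
    by_cases hlast : k = s.toList.length - 1
    · -- last index: first branch of the step
      have hbeq : ((k : Int) == (s.toList.length : Int) - 1) = true := by
        simp only [beq_iff_eq]; omega
      have hstep : pvStepA s (s.toList.length : Int) ((m : Int) - 1, res) (k : Int)
          = ((m : Int) - 1,
             res ++ if (PySem.Chars.strip ((s.toList.drop m).take (k + 1 - m))).length > 3
               then [String.ofList (PySem.Chars.strip ((s.toList.drop m).take (k + 1 - m)))]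
               else []) := by
        rw [pvStepA]
        simp only [hbeq, if_true]
        have : (m : Int) - 1 + 1 = ((m : Nat) : Int) := by ring
        rw [this]
        have h2 : (k : Int) + 1 = ((k + 1 : Nat) : Int) := by push_cast; ring
        rw [h2, pvStrip_slice, pvLen_ofList]
        by_cases hc : (PySem.Chars.strip ((s.toList.drop m).take (k + 1 - m))).length > 3
        · rw [if_pos (by exact_mod_cast hc), if_pos hc]
        · rw [if_neg (by exact_mod_cast hc), if_neg hc]
          simp
      rw [hstep]
      have hrange : PySem.List.pyRange ((k : Int) + 1) (s.toList.length : Int) 1 = [] := by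
        have : (k : Int) + 1 = ((k + 1 : Nat) : Int) := by push_cast; ring
        rw [this]
        have : (k + 1 : Nat) = s.toList.length := by omega
        rw [this]
        simp [PySem.List.pyRange]
      rw [hrange, List.foldl_nil]
      have hdrop : s.toList.drop k = [s.toList[k]] := by
        rw [List.drop_eq_getElem_cons hkn]
        have : k + 1 = s.toList.length := by omega
        simp [this]
      rw [hdrop]
      have hseg : pvSegs ((s.toList.drop m).take (k - m)) [s.toList[k]]
          = [(s.toList.drop m).take (k + 1 - m)] := by
        rw [pvSegs, ← pvTake_succ s.toList m k hmk hkn]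
      rw [hseg]
      by_cases hc : (PySem.Chars.strip ((s.toList.drop m).take (k + 1 - m))).length > 3 <;>
        simp [pvOut, hc]
    · -- not the last index
      have hbeq : ((k : Int) == (s.toList.length : Int) - 1) = false := by
        simp only [beq_eq_false_iff_ne, ne_eq]; omega
      have hget : PySem.Str.pyGet? s (k : Int) = some s.toList[k] := by
        simp [List.getElem?_eq_getElem hkn]
      have hrest : s.toList.drop (k + 1) ≠ [] := by
        intro hnil
        have h := congrArg List.length hnil
        rw [List.length_drop] at h
        simp only [List.length_nil] at h
        omega
      have hconskp : s.toList.drop k = s.toList[k] :: s.toList.drop (k + 1) :=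
        List.drop_eq_getElem_cons hkn
      by_cases hdot : s.toList[k] = '.'
      · have hstep : pvStepA s (s.toList.length : Int) ((m : Int) - 1, res) (k : Int)
            = ((k : Int),
               res ++ if (PySem.Chars.strip ((s.toList.drop m).take (k - m))).length > 3
                 then [String.ofList (PySem.Chars.strip ((s.toList.drop m).take (k - m)))]
                 else []) := by
          rw [pvStepA]
          simp only [hbeq, Bool.false_eq_true, if_false, hget, hdot, BEq.rfl, if_true]
          have : (m : Int) - 1 + 1 = ((m : Nat) : Int) := by ring
          rw [this, pvStrip_slice, pvLen_ofList]
          by_cases hc : (PySem.Chars.strip ((s.toList.drop m).take (k - m))).length > 3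
          · rw [if_pos (by exact_mod_cast hc), if_pos hc]
          · rw [if_neg (by exact_mod_cast hc), if_neg hc]
            simp
        rw [hstep]
        have hcast : (k : Int) = ((k + 1 : Nat) : Int) - 1 := by push_cast; ring
        rw [show ((k:Int) + 1) = ((k + 1 : Nat) : Int) by push_cast; ring, hcast]
        rw [ih (k + 1) (k + 1) _ (by omega) (by omega) (by omega)]
        rw [hconskp, hdot, pvSegs_cons _ _ _ hrest, if_pos rfl, pvOut_cons]
        simp
      · have hstep : pvStepA s (s.toList.length : Int) ((m : Int) - 1, res) (k : Int)
            = ((m : Int) - 1, res) := by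
          rw [pvStepA]
          simp only [hbeq, Bool.false_eq_true, if_false, hget]
          simp [hdot]
        rw [hstep]
        rw [show ((k:Int) + 1) = ((k + 1 : Nat) : Int) by push_cast; ring]
        rw [ih (k + 1) m res (by omega) (by omega) (by omega)]
        rw [hconskp, pvSegs_cons _ _ _ hrest, if_neg hdot, pvTake_succ s.toList m k hmk hkn]

theorem pvA_eq (s : String) : parseImpressions s = pvOut (pvSegs [] s.toList) := by
  rw [parseImpressions]
  have h0 : (0 : Int) = ((0 : Nat) : Int) := rfl
  have hlen : PySem.Str.len s = (s.toList.length : Int) := rfl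
  rw [hlen]
  rw [show ((-1 : Int)) = ((0 : Nat) : Int) - 1 by simp]
  rw [show (PySem.List.pyRange 0 (s.toList.length : Int) 1)
      = PySem.List.pyRange ((0 : Nat) : Int) (s.toList.length : Int) 1 by rfl]
  rw [pvA_loop s s.toList.length 0 0 [] (by omega) (by omega) (by omega)]
  simp

-- ===== VERDICT (by name: the statement is the Claim_ definition above) =====
theorem parseImpressions_spec : Claim_equal_parseImpressions := by
  intro s _
  unfold Spec_parseImpressions
  rw [pvA_eq, pvB_eq]
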